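-- pv_equiv track=rewrite | github.com/pranati04/Certificate-tools | krutidev_converter/unicode_to_krutidev_excel.py | _fix_i_matra
-- ===== SOURCE A (Python) =====
-- def _fix_i_matra(text: str) -> str:
--     """Swap 'f' (ि matra) one position left — KrutiDev rendering convention."""
--     out = list(text)
--     i = 1
--     while i < len(out):
--         if out[i] == "f":
--             out[i], out[i - 1] = out[i - 1], out[i]
--         i += 1
--     return "".join(out)
-- ===== SOURCE B (Python) =====
-- import re
--
-- def _fix_i_matra(text: str) -> str:
--     """Swap 'f' (ि matra) one position left — KrutiDev rendering convention."""
--     return re.sub(r'(.)(f+)', r'\2\1', text, flags=re.S)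
-- ===== Notes on version B (the rewrite author's own statement) =====
-- stated objective: idiomatic
-- what changed: Replaced the in-place index-and-swap while loop over a char list by a single DOTALL regex substitution that rewrites each character followed by a maximal run of f characters into the run followed by that character.
import Mathlib
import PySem

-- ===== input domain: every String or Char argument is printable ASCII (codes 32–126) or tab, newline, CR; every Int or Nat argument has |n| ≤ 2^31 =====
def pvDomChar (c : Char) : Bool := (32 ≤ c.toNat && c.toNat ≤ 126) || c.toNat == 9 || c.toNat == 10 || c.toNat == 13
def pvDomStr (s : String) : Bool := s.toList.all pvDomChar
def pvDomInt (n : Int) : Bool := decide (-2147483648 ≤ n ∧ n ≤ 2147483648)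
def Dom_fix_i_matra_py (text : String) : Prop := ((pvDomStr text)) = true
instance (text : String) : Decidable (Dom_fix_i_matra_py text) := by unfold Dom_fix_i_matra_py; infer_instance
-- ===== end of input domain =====

-- B replaces A's index-and-swap while loop by one regex substitution (ported by hand below); objective: idiomatic.

-- ===== PORT A =====
-- literal port of A's while loop: in-place swaps on the char list, index i from 1
def pvLoopA (out : List Char) (i : Nat) : List Char :=
  if _h : i < out.length then
    if out[i]! = 'f' then
      -- out[i], out[i-1] = out[i-1], out[i]
      pvLoopA ((out.set i out[i-1]!).set (i-1) out[i]!) (i + 1)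
    else
      pvLoopA out (i + 1)
  else out
termination_by out.length - i
decreasing_by all_goals simp_all; omega

def fix_i_matra_py (text : String) : String :=
  String.ofList (pvLoopA text.toList 1)

-- ===== PORT B =====
-- hand-port of re.sub(r'(.)(f+)', r'\2\1', text, flags=re.S): exact — the regex engine
-- scans left to right; at each position it matches any one char followed by the maximal
-- (greedy) run of 'f's, emits run-then-char, and resumes after the match; otherwise it
-- copies the char and moves on.
def pvSub (l : List Char) : List Char :=
  match l with
  | [] => []
  | c :: rest =>
    let run := rest.takeWhile (· = 'f')
    if run.isEmpty then c :: pvSub rest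
    else run ++ c :: pvSub (rest.dropWhile (· = 'f'))
termination_by l.length
decreasing_by
  · simp
  · simp; exact List.length_dropWhile_le _ _

def fix_i_matra_py_alt (text : String) : String :=
  String.ofList (pvSub text.toList)

-- ===== PRECONDITION & SPEC =====
def Spec_fix_i_matra_py (text : String) (out : String) : Prop := out = fix_i_matra_py_alt text
instance (text : String) (out : String) : Decidable (Spec_fix_i_matra_py text out) := by unfold Spec_fix_i_matra_py; infer_instance

-- ===== CLAIM (what is proved, stated in full; the proofs are below) =====
def Claim_equal_fix_i_matra_py : Prop := ∀ (text : String), Dom_fix_i_matra_py text → Spec_fix_i_matra_py text (fix_i_matra_py text)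

-- ===== LEMMAS AND PROOFS =====

-- pvSub applied to a char followed by an 'f' pulls that 'f' to the front
lemma pvSub_cons_f (c : Char) (r : List Char) :
    pvSub (c :: 'f' :: r) = 'f' :: pvSub (c :: r) := by
  conv_lhs => rw [pvSub]
  conv_rhs => rw [pvSub]
  simp only [List.takeWhile_cons, List.dropWhile_cons, decide_true, if_true]
  rw [if_neg (by simp)]
  by_cases h : List.takeWhile (fun x => decide (x = 'f')) r = []
  · have hd := List.takeWhile_append_dropWhile (p := fun x => decide (x = 'f')) (l := r)
    rw [h] at hd
    simp only [List.nil_append] at hd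
    rw [if_pos (by simp [h]), h, hd]
    simp
  · rw [if_neg (by simpa [List.isEmpty_iff] using h)]
    simp

lemma pvSub_cons_not_f (c d : Char) (r : List Char) (hd : d ≠ 'f') :
    pvSub (c :: d :: r) = c :: pvSub (d :: r) := by
  conv_lhs => rw [pvSub]
  simp [hd]

-- loop invariant: positions < p.length are final; head of the suffix is the pending char
lemma pvLoopA_spec (r : List Char) : ∀ (p : List Char) (c : Char),
    pvLoopA (p ++ c :: r) (p.length + 1) = p ++ pvSub (c :: r) := by
  induction r with
  | nil =>
    intro p c
    rw [pvLoopA, dif_neg (by simp)]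
    rw [pvSub]
    simp [pvSub]
  | cons d r' ih =>
    intro p c
    rw [pvLoopA]
    have hlen : p.length + 1 < (p ++ c :: d :: r').length := by simp
    have hget : (p ++ c :: d :: r')[p.length + 1]! = d := by simp
    have hgetc : (p ++ c :: d :: r')[p.length]! = c := by simp
    simp only [hlen, dif_pos, hget, Nat.add_sub_cancel, hgetc]
    by_cases hd : d = 'f'
    · subst hd
      have hset : ((p ++ c :: 'f' :: r').set (p.length + 1) c).set p.length 'f'
          = (p ++ ['f']) ++ c :: r' := by
        simp [List.set_cons_succ, List.set_cons_zero]
      rw [hset]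
      have := ih (p ++ ['f']) c
      simp only [List.length_append, List.length_cons, List.length_nil] at this
      rw [this, pvSub_cons_f]
      simp
    · rw [if_neg hd]
      have : p ++ c :: d :: r' = (p ++ [c]) ++ d :: r' := by simp
      rw [this]
      have h2 := ih (p ++ [c]) d
      simp only [List.length_append, List.length_cons, List.length_nil] at h2
      rw [h2, pvSub_cons_not_f c d r' hd]
      simp

-- ===== VERDICT (by name: the statement is the Claim_ definition above) =====
theorem fix_i_matra_py_spec : Claim_equal_fix_i_matra_py := by
  intro text _
  unfold Spec_fix_i_matra_py fix_i_matra_py fix_i_matra_py_alt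
  cases h : text.toList with
  | nil =>
    rw [pvLoopA, dif_neg (by simp), pvSub]
  | cons c r =>
    refine congrArg String.ofList ?_
    have := pvLoopA_spec r [] c
    simpa using this
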